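-- pv_equiv track=rewrite | github.com/ashwinnaresh/AML-NLP-Course | Cricket Match Summary Generation/MaxEnt/feature_functions.py | f6
-- ===== SOURCE A (Python) =====
-- def f6(h,t):
-- 	'''
-- 	Event : Runout
-- 	'''
-- 	if t == 'Runout':
-- 		for i in h:
-- 			if i == 'OUT':
-- 				if 'direct hit' in h[h.index(i):]:
-- 					return 1
-- 				else:
-- 					return 0
-- 			elif i == 'run':
-- 				if 'out' in h[h.index(i):]:
-- 					return 1
-- 				else:
-- 					return 0
-- 	return 0
-- ===== SOURCE B (Python) =====
-- def f6(h, t):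
--     if t != 'Runout':
--         return 0
--     dh = False   # 'direct hit' seen in the suffix processed so far
--     out = False  # 'out' seen in the suffix processed so far
--     ans = 0
--     for x in reversed(h):
--         if x == 'OUT':
--             ans = 1 if dh else 0
--         elif x == 'run':
--             ans = 1 if out else 0
--         if x == 'direct hit':
--             dh = True
--         elif x == 'out':
--             out = True
--     return ans
-- ===== Notes on version B (the rewrite author's own statement) =====
-- stated objective: alternative
-- what changed: A scans forward, stops at the first 'OUT'/'run' marker and then re-scans the tail slice for the partner string; B makes one right-to-left pass with boolean accumulators ('direct hit'/'out' seen in the suffix) and overwrites the answer at each marker, so the leftmost marker's decision survives - no index, slicing or inner membership scan.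
import Mathlib
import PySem

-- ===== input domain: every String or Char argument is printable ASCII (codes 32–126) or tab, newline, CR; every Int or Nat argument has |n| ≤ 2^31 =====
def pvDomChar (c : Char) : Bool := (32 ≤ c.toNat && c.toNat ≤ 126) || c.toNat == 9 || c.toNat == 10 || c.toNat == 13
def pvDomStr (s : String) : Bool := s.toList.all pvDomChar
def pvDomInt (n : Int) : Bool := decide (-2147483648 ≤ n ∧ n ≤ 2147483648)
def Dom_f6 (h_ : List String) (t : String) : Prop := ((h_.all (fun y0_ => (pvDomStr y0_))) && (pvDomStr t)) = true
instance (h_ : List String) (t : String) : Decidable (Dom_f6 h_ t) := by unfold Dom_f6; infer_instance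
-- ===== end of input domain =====

-- B replaces A's forward early-returning scan (with an inner tail-membership rescan) by one
-- right-to-left pass carrying two 'seen in the suffix' booleans and an overwritten answer
-- (objective: alternative single-pass algorithm, same cost).

-- ===== PORT A =====
-- the for-loop: scans the suffix `rest` of the full list h, with h in scope for h.index(i)/h[...:]
def f6LoopA (h : List String) : List String → Int
  | [] => 0
  | i :: rest =>
    if i = "OUT" then
      if "direct hit" ∈ PySem.List.slice h (some (((PySem.List.index? h i).getD 0 : Nat) : Int)) none then 1 else 0
    else if i = "run" then
      if "out" ∈ PySem.List.slice h (some (((PySem.List.index? h i).getD 0 : Nat) : Int)) none then 1 else 0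
    else f6LoopA h rest

def f6 (h_ : List String) (t : String) : Int :=
  if t = "Runout" then f6LoopA h_ h_ else 0

-- ===== PORT B =====
-- loop body of Source B: state (dh, out, ans); first the if/elif updating ans, then the one updating dh/out
def f6StepB (s : Bool × Bool × Int) (x : String) : Bool × Bool × Int :=
  let ans : Int :=
    if x = "OUT" then (if s.1 then 1 else 0)
    else if x = "run" then (if s.2.1 then 1 else 0)
    else s.2.2
  if x = "direct hit" then (true, s.2.1, ans)
  else if x = "out" then (s.1, true, ans)
  else (s.1, s.2.1, ans)

def f6_alt (h_ : List String) (t : String) : Int :=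
  if t ≠ "Runout" then 0
  else (h_.reverse.foldl f6StepB (false, false, 0)).2.2

-- ===== PRECONDITION & SPEC =====
def Spec_f6 (h_ : List String) (t : String) (out : Int) : Prop := out = f6_alt h_ t
instance (h_ : List String) (t : String) (out : Int) : Decidable (Spec_f6 h_ t out) := by unfold Spec_f6; infer_instance

-- ===== CLAIM =====
def Claim_equal_f6 : Prop := ∀ (h_ : List String) (t : String), Dom_f6 h_ t → Spec_f6 h_ t (f6 h_ t)

-- ===== LEMMAS AND PROOFS =====

-- reference recursion: A's answer depends only on the remaining suffix
def fAns : List String → Int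
  | [] => 0
  | x :: rs =>
    if x = "OUT" then (if "direct hit" ∈ x :: rs then 1 else 0)
    else if x = "run" then (if "out" ∈ x :: rs then 1 else 0)
    else fAns rs

theorem index?_append_not_mem (pre l : List String) (v : String) (hv : v ∉ pre) :
    PySem.List.index? (pre ++ l) v = (PySem.List.index? l v).map (· + pre.length) := by
  induction pre with
  | nil => simp [Option.map_id']
  | cons x xs ih =>
    have hx : x ≠ v := by rintro rfl; exact hv (List.mem_cons_self ..)
    have hv' : v ∉ xs := fun h => hv (List.mem_cons_of_mem _ h)
    rw [List.cons_append, PySem.List.index?_cons_of_ne _ hx, ih hv']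
    cases PySem.List.index? l v with
    | none => simp
    | some k => simp; omega

theorem loopA_eq_fAns (rest pre : List String)
    (hOUT : "OUT" ∉ pre) (hrun : "run" ∉ pre) :
    f6LoopA (pre ++ rest) rest = fAns rest := by
  induction rest generalizing pre with
  | nil => simp [f6LoopA, fAns]
  | cons x rs ih =>
    by_cases hx1 : x = "OUT"
    · subst hx1
      have hO : PySem.List.index? (pre ++ "OUT" :: rs) "OUT" = some pre.length := by
        rw [index?_append_not_mem _ _ _ hOUT, PySem.List.index?_cons_self]; simp
      have hs : PySem.List.slice (pre ++ "OUT" :: rs) (some ((pre.length : Nat) : Int)) none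
          = "OUT" :: rs := by
        rw [PySem.List.slice_from_natCast]; simp
      simp only [f6LoopA, hO, Option.getD_some, hs]
      simp [fAns]
    · by_cases hx2 : x = "run"
      · subst hx2
        have hR : PySem.List.index? (pre ++ "run" :: rs) "run" = some pre.length := by
          rw [index?_append_not_mem _ _ _ hrun, PySem.List.index?_cons_self]; simp
        have hs : PySem.List.slice (pre ++ "run" :: rs) (some ((pre.length : Nat) : Int)) none
            = "run" :: rs := by
          rw [PySem.List.slice_from_natCast]; simp
        simp only [f6LoopA, hR, Option.getD_some, hs, if_neg hx1]
        simp [fAns, hx1]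
      · have := ih (pre ++ [x])
          (by simp; exact ⟨hOUT, fun h => hx1 h.symm⟩)
          (by simp; exact ⟨hrun, fun h => hx2 h.symm⟩)
        simpa [f6LoopA, fAns, hx1, hx2] using this

theorem foldB_eq (h : List String) :
    h.foldr (fun x s => f6StepB s x) (false, false, 0)
      = (decide ("direct hit" ∈ h), decide ("out" ∈ h), fAns h) := by
  induction h with
  | nil => simp [fAns]
  | cons x rs ih =>
    rw [List.foldr_cons, ih]
    simp only [f6StepB]
    by_cases h3 : x = "direct hit"
    · subst h3; simp [fAns]
    · by_cases h4 : x = "out"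
      · subst h4; simp [fAns]
      · by_cases h1 : x = "OUT"
        · subst h1; simp [fAns]
        · by_cases h2 : x = "run"
          · subst h2; simp [fAns]
          · have h3' : "direct hit" ≠ x := fun h => h3 h.symm
            have h4' : "out" ≠ x := fun h => h4 h.symm
            simp [fAns, h1, h2, h3, h4, h3', h4']

-- ===== VERDICT =====
theorem f6_spec : Claim_equal_f6 := by
  intro h_ t _
  unfold Spec_f6 f6 f6_alt
  by_cases ht : t = "Runout"
  · subst ht
    rw [if_pos rfl, if_neg (by simp), List.foldl_reverse, foldB_eq]
    simpa using loopA_eq_fAns h_ [] (by simp) (by simp)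
  · rw [if_neg ht, if_pos ht]
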